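-- pv_equiv track=rewrite | github.com/jjs142458/-CodingTest | 이상한 문자 만들기.py | solution
-- ===== SOURCE A (Python) =====
-- def solution(s):
--     answer = ''
--     string = list(s)
--     num = 0
--     for i in string:
--         if (num == 0):
--             answer += i.upper()
--             num = 1
--         else:
--             answer += i.lower()
--             num = 0
--         if (i == " "):
--             num = 0
--
--     return answer
-- ===== SOURCE B (Python) =====
-- def solution(s):
--     words = s.split(' ')
--     transformed = [
--         ''.join(c.upper() if i % 2 == 0 else c.lower() for i, c in enumerate(w))
--         for w in words
--     ]
--     return ' '.join(transformed)
-- ===== Notes on version B (the rewrite author's own statement) =====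
-- stated objective: idiomatic
-- what changed: Replaces A's single character-stream loop with a mutable parity flag by a word-level decomposition: split on ' ', re-case each word by character index parity via enumerate, and join with ' '.
import Mathlib
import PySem

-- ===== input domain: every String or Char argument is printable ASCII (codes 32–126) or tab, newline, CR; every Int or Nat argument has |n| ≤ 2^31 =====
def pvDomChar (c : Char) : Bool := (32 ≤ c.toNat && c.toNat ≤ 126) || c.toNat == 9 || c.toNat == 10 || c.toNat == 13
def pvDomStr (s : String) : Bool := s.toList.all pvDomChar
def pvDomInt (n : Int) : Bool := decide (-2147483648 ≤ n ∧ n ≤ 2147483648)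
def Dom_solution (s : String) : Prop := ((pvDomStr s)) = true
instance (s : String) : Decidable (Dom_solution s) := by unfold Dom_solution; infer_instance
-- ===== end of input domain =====

-- B replaces A's char-stream loop with a split(' ')/per-word-index/join decomposition (idiomatic, same cost).

-- ===== PORT A =====
-- literal transliteration of A's loop: state (answer, num), branch order preserved
def solution (s : String) : String :=
  let string := s.toList
  let r := string.foldl (fun (st : List Char × Int) i =>
      let st2 := if st.2 == 0 then (st.1 ++ [PySem.Chars.upperChar i], (1 : Int))
                 else (st.1 ++ [PySem.Chars.lowerChar i], (0 : Int))
      if i == ' ' then (st2.1, (0 : Int)) else st2)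
    (([] : List Char), (0 : Int))
  String.mk r.1

-- ===== PORT B =====
-- literal transliteration of Source B: split on ' ', per-word enumerate with parity casing, join with ' '
def solution_alt (s : String) : String :=
  let words := PySem.Chars.splitOn s.toList [' ']
  let transformed := words.map (fun w =>
    (PySem.List.enumerate w).map (fun p =>
      if PySem.Int.mod p.1 2 == 0 then PySem.Chars.upperChar p.2 else PySem.Chars.lowerChar p.2))
  String.mk (PySem.Chars.join [' '] transformed)

-- ===== PRECONDITION & SPEC =====
def Spec_solution (s : String) (out : String) : Prop := out = solution_alt s
instance (s : String) (out : String) : Decidable (Spec_solution s out) := by unfold Spec_solution; infer_instance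

-- ===== CLAIM (what is proved, stated in full; the proofs are below) =====
def Claim_equal_solution : Prop := ∀ (s : String), Dom_solution s → Spec_solution s (solution s)

-- ===== LEMMAS AND PROOFS =====

-- proof-side recursive description of A's transform (num ∈ {0,1})
def pvG : List Char → Int → List Char
  | [], _ => []
  | c :: cs, n =>
      (if n == 0 then PySem.Chars.upperChar c else PySem.Chars.lowerChar c) ::
        pvG cs (if c == ' ' then 0 else if n == 0 then 1 else 0)

-- proof-side splitter: (first word, remaining words) of splitting on ' '
def pvSp : List Char → List Char × List (List Char)
  | [] => ([], [])
  | c :: cs =>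
      if c == ' ' then ([], (pvSp cs).1 :: (pvSp cs).2)
      else (c :: (pvSp cs).1, (pvSp cs).2)

-- the per-word transform of B
def pvTw (i : Int) (w : List Char) : List Char :=
  (PySem.List.enumerate w i).map (fun p =>
    if PySem.Int.mod p.1 2 == 0 then PySem.Chars.upperChar p.2 else PySem.Chars.lowerChar p.2)

theorem pvFoldA (cs : List Char) : ∀ (st : List Char × Int),
    (cs.foldl (fun (st : List Char × Int) i =>
      let st2 := if st.2 == 0 then (st.1 ++ [PySem.Chars.upperChar i], (1 : Int))
                 else (st.1 ++ [PySem.Chars.lowerChar i], (0 : Int))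
      if i == ' ' then (st2.1, (0 : Int)) else st2) st).1 = st.1 ++ pvG cs st.2 := by
  induction cs with
  | nil => intro st; simp [pvG]
  | cons c cs ih =>
      intro st
      rw [List.foldl_cons, ih]
      by_cases hc : c = ' ' <;> by_cases hn : st.2 = 0 <;>
        simp [pvG, hc, hn]

theorem pvGoEq (l : List Char) : ∀ (fuel : Nat), l.length ≤ fuel →
    ∀ (cur : List Char) (acc : List (List Char)),
    PySem.Chars.splitOn.go [' '] fuel l cur acc =
      acc.reverse ++ (cur.reverse ++ (pvSp l).1) :: (pvSp l).2 := by
  induction l with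
  | nil =>
      intro fuel _ cur acc
      cases fuel <;> simp [PySem.Chars.splitOn.go, pvSp]
  | cons c rest ih =>
      intro fuel hf cur acc
      cases fuel with
      | zero => simp at hf
      | succ f =>
          by_cases hc : c = ' '
          · subst hc
            have hpre : ([' '] : List Char).isPrefixOf (' ' :: rest) = true := by
              simp [List.isPrefixOf]
            simp only [PySem.Chars.splitOn.go, hpre, if_pos]
            simp [ih f (by simpa using hf) [] (cur.reverse :: acc), pvSp]
          · have hpre : ([' '] : List Char).isPrefixOf (c :: rest) = false := by
              simp [List.isPrefixOf]; exact fun h => hc h.symm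
            simp only [PySem.Chars.splitOn.go, hpre]
            simp [ih f (by simpa using hf) (c :: cur) acc, pvSp, hc]

theorem pvSplitOnEq (cs : List Char) :
    PySem.Chars.splitOn cs [' '] = (pvSp cs).1 :: (pvSp cs).2 := by
  have := pvGoEq cs (cs.length + 1) (by omega) [] []
  simpa [PySem.Chars.splitOn] using this

theorem pvJoinConsHead (x : Char) (w : List Char) (ws : List (List Char)) :
    PySem.Chars.join [' '] ((x :: w) :: ws) = x :: PySem.Chars.join [' '] (w :: ws) := by
  cases ws with
  | nil => simp [PySem.Chars.join_singleton]
  | cons y ys => simp [PySem.Chars.join_cons_cons]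

theorem pvMain (cs : List Char) : ∀ (i : Nat),
    pvG cs (((i % 2 : Nat) : Int)) =
      PySem.Chars.join [' '] (pvTw (i : Int) (pvSp cs).1 :: ((pvSp cs).2).map (pvTw 0)) := by
  induction cs with
  | nil =>
      intro i
      simp [pvG, pvSp, pvTw, PySem.List.enumerate_nil, PySem.Chars.join_singleton]
  | cons c cs ih =>
      intro i
      by_cases hc : c = ' '
      · subst hc
        have h0 := ih 0
        simp only [Nat.zero_mod, Nat.cast_zero] at h0
        have hu : PySem.Chars.upperChar ' ' = ' ' := by decide
        have hl : PySem.Chars.lowerChar ' ' = ' ' := by decide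
        have hsp : pvSp (' ' :: cs) = ([], (pvSp cs).1 :: (pvSp cs).2) := by
          simp [pvSp]
        rw [hsp]
        rw [pvTw, PySem.List.enumerate_nil, List.map_nil, List.map_cons,
          PySem.Chars.join_cons_cons]
        rcases Nat.mod_two_eq_zero_or_one i with h | h <;>
          simp [pvG, h, hu, hl, h0, pvTw]
      · have hspc : (pvSp (c :: cs)) = (c :: (pvSp cs).1, (pvSp cs).2) := by
          simp [pvSp, hc]
        rw [hspc]
        rw [pvTw, PySem.List.enumerate_cons, List.map_cons]
        rw [pvJoinConsHead]
        have hih := ih (i + 1)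
        rcases Nat.mod_two_eq_zero_or_one i with h | h
        · have h1 : (i + 1) % 2 = 1 := by omega
          rw [h1] at hih
          simp only [h, Nat.cast_zero, Nat.cast_one, Nat.cast_add] at hih ⊢
          simp [pvG, hc, pvTw, hih]
          intro hbad
          exfalso; omega
        · have h1 : (i + 1) % 2 = 0 := by omega
          rw [h1] at hih
          simp only [h, Nat.cast_zero, Nat.cast_one, Nat.cast_add] at hih ⊢
          simp [pvG, hc, pvTw, hih]
          intro hbad
          exfalso; omega

-- ===== VERDICT (by name: the statement is the Claim_ definition above) =====
theorem solution_spec : Claim_equal_solution := by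
  intro s _
  unfold Spec_solution solution solution_alt
  have hm := pvMain s.toList 0
  simp only [Nat.zero_mod, Nat.cast_zero] at hm
  simp only [pvSplitOnEq, pvFoldA s.toList ([], 0), List.nil_append, List.map_cons]
  rw [hm]
  rfl
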